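-- pv_equiv track=rewrite | github.com/hunmaster/openclaw_power | src/main.py | find_account
-- ===== SOURCE A (Python) =====
-- def find_account(accounts, account_label):
--     """라벨로 계정을 찾습니다."""
--     if not account_label:
--         return accounts[0] if accounts else None
--
--     for acc in accounts:
--         if acc.get("label") == account_label:
--             return acc
--
--     for acc in accounts:
--         if acc.get("email", "").startswith(account_label):
--             return acc
--
--     return accounts[0] if accounts else None
-- ===== SOURCE B (Python) =====
-- def find_account(accounts, account_label):
--     """라벨로 계정을 찾습니다."""
--     if not accounts:
--         return None
--     if not account_label:
--         return accounts[0]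
--
--     def rank(acc):
--         if acc.get("label") == account_label:
--             return 0
--         if acc.get("email", "").startswith(account_label):
--             return 1
--         return 2
--
--     return min(accounts, key=rank)
-- ===== Notes on version B (the rewrite author's own statement) =====
-- stated objective: alternative
-- what changed: Replaces A's staged scans (label pass, then prefix pass, then default) with a rank function (0 exact label, 1 email prefix, 2 otherwise) and a single stable min-by-rank over the accounts.
import Mathlib
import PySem

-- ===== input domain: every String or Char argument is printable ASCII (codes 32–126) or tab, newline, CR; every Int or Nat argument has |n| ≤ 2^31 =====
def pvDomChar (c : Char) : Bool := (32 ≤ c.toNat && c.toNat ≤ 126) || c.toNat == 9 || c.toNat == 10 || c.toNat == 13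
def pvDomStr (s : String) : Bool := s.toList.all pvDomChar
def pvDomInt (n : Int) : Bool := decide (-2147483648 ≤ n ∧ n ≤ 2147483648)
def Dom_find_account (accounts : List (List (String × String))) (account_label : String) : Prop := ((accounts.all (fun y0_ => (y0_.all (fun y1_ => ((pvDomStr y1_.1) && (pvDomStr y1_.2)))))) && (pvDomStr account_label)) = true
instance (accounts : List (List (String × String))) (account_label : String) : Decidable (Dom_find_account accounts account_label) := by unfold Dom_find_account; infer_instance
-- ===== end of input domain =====

-- B replaces A's staged scans with a rank function (0 label match, 1 email-prefix, 2 otherwise)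
-- and one stable min-by-rank; objective: alternative (same cost, different algorithm).

-- dict.get k (first-match lookup on the association list)
def pvGetKey (acc : List (String × String)) (k : String) : Option String :=
  (acc.find? (fun p => p.1 == k)).map (·.2)

-- ===== PORT A =====
-- first for-loop: return acc on exact label match
def find_account_loop1 (accounts : List (List (String × String))) (account_label : String) :
    Option (List (String × String)) :=
  match accounts with
  | [] => none
  | acc :: rest =>
    if pvGetKey acc "label" = some account_label then some acc
    else find_account_loop1 rest account_label

-- second for-loop: return acc on email-prefix match
def find_account_loop2 (accounts : List (List (String × String))) (account_label : String) :
    Option (List (String × String)) :=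
  match accounts with
  | [] => none
  | acc :: rest =>
    if PySem.Str.startswith ((pvGetKey acc "email").getD "") account_label = true then some acc
    else find_account_loop2 rest account_label

def find_account (accounts : List (List (String × String))) (account_label : String) :
    Option (List (String × String)) :=
  if account_label = "" then accounts.head?
  else
    match find_account_loop1 accounts account_label with
    | some acc => some acc
    | none =>
      match find_account_loop2 accounts account_label with
      | some acc => some acc
      | none => accounts.head?

-- ===== PORT B =====
-- rank(acc): 0 = exact label match, 1 = email-prefix match, 2 = neither
def pvRank (acc : List (String × String)) (account_label : String) : Nat :=
  if pvGetKey acc "label" = some account_label then 0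
  else if PySem.Str.startswith ((pvGetKey acc "email").getD "") account_label = true then 1
  else 2

def find_account_alt (accounts : List (List (String × String))) (account_label : String) :
    Option (List (String × String)) :=
  match accounts with
  | [] => none
  | first :: rest =>
    if account_label = "" then some first
    else
      -- min(accounts, key=rank): Python's stable running minimum (strict-< replacement)
      some (rest.foldl
        (fun best acc => if pvRank acc account_label < pvRank best account_label then acc else best)
        first)

-- ===== PRECONDITION & SPEC =====
def Spec_find_account (accounts : List (List (String × String))) (account_label : String) (out : Option (List (String × String))) : Prop := out = find_account_alt accounts account_label
instance (accounts : List (List (String × String))) (account_label : String) (out : Option (List (String × String))) : Decidable (Spec_find_account accounts account_label out) := by unfold Spec_find_account; infer_instance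

-- ===== CLAIM (what is proved, stated in full; the proofs are below) =====
def Claim_equal_find_account : Prop := ∀ (accounts : List (List (String × String))) (account_label : String), Dom_find_account accounts account_label → Spec_find_account accounts account_label (find_account accounts account_label)

-- ===== LEMMAS AND PROOFS =====

-- the running minimum by rank, started at best b, equals: the first rank-0 element of l
-- (unless b already has rank 0), else b if rank b ≤ 1, else the first startswith element, else b
theorem foldl_min_rank_eq
    (l : List (List (String × String))) (lbl : String) (b : List (String × String)) :
    l.foldl (fun best acc => if pvRank acc lbl < pvRank best lbl then acc else best) b =
      match find_account_loop1 l lbl with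
      | some x => if pvRank b lbl = 0 then b else x
      | none =>
        if pvRank b lbl ≤ 1 then b
        else
          match find_account_loop2 l lbl with
          | some x => x
          | none => b := by
  induction l generalizing b with
  | nil =>
    by_cases h0 : pvRank b lbl = 0
    · simp [find_account_loop1, find_account_loop2, h0]
    · by_cases h1 : pvRank b lbl ≤ 1 <;>
        simp [find_account_loop1, find_account_loop2, h0, h1]
  | cons h t ih =>
    by_cases hl : pvGetKey h "label" = some lbl
    · -- rank h = 0
      have hr : pvRank h lbl = 0 := by simp [pvRank, hl]
      by_cases hb0 : pvRank b lbl = 0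
      · have : ¬ pvRank h lbl < pvRank b lbl := by omega
        simp only [List.foldl_cons, this, ih]
        simp [find_account_loop1, hl, hb0]
        split <;> rfl
      · have hlt : pvRank h lbl < pvRank b lbl := by
          have : pvRank b lbl ≠ 0 := hb0
          omega
        simp only [List.foldl_cons, if_pos hlt, ih]
        simp [find_account_loop1, hl, hb0, hr]
        cases find_account_loop1 t lbl <;> simp
    · by_cases hp : PySem.Str.startswith ((pvGetKey h "email").getD "") lbl = true
      · -- rank h = 1
        simp only [PySem.Str.startswith_eq] at hp
        have hr : pvRank h lbl = 1 := by simp [pvRank, hl, hp]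
        have hrb : pvRank b lbl = 0 ∨ pvRank b lbl = 1 ∨ pvRank b lbl = 2 := by
          unfold pvRank; split_ifs <;> omega
        rcases hrb with hb | hb | hb
        · have : ¬ pvRank h lbl < pvRank b lbl := by omega
          simp only [List.foldl_cons, if_neg this, ih]
          simp [find_account_loop1, hl, hb]
        · have : ¬ pvRank h lbl < pvRank b lbl := by omega
          simp only [List.foldl_cons, if_neg this, ih]
          simp [find_account_loop1, hl, hb]
        · have hlt : pvRank h lbl < pvRank b lbl := by omega
          simp only [List.foldl_cons, if_pos hlt, ih]
          simp [find_account_loop1, find_account_loop2, hl, hp, hb, hr]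
      · -- rank h = 2: never strictly below any best
        simp only [PySem.Str.startswith_eq] at hp
        have hr : pvRank h lbl = 2 := by simp [pvRank, hl, hp]
        have : ¬ pvRank h lbl < pvRank b lbl := by
          have : pvRank b lbl ≤ 2 := by unfold pvRank; split_ifs <;> omega
          omega
        simp only [List.foldl_cons, if_neg this, ih]
        simp [find_account_loop1, find_account_loop2, hl, (Bool.not_eq_true _).mp hp]

-- ===== VERDICT (by name: the statement is the Claim_ definition above) =====
theorem find_account_spec : Claim_equal_find_account := by
  intro accounts account_label _
  unfold Spec_find_account find_account find_account_alt
  cases accounts with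
  | nil => by_cases he : account_label = "" <;> simp [he, find_account_loop1, find_account_loop2]
  | cons a rest =>
    by_cases he : account_label = ""
    · simp [he]
    · simp only [he, if_neg he, foldl_min_rank_eq]
      by_cases hl : pvGetKey a "label" = some account_label
      · have hr : pvRank a account_label = 0 := by simp [pvRank, hl]
        simp [find_account_loop1, hl, hr]
        cases find_account_loop1 rest account_label <;> simp
      · by_cases hp : PySem.Str.startswith ((pvGetKey a "email").getD "") account_label = true <;>
          simp only [PySem.Str.startswith_eq] at hp
        · have hr : pvRank a account_label = 1 := by simp [pvRank, hl, hp]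
          simp [find_account_loop1, find_account_loop2, hl, hp, hr]
          cases find_account_loop1 rest account_label <;> simp
        · have hr : pvRank a account_label = 2 := by simp [pvRank, hl, hp]
          simp [find_account_loop1, find_account_loop2, hl, hp, hr]
          cases find_account_loop1 rest account_label with
          | none =>
            cases find_account_loop2 rest account_label <;> simp
          | some x => simp
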